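-- pv_equiv track=rewrite | github.com/kartikbandarwad99/Product_Hunt | helper_funcs.py | build_bigram_dataset
-- ===== SOURCE A (Python) =====
-- def build_bigram_dataset(data,stoi):
--     xs = []
--     ys = []
--
--     for i in data:
--         w = []
--         w = ['<start>'] + list(i) + ['<end>']
--         for i in range(len(w)-1):
--             xs.append(stoi[w[i]])
--             ys.append(stoi[w[i+1]])
--     return xs,ys
-- ===== SOURCE B (Python) =====
-- def build_bigram_dataset(data, stoi):
--     xs = [stoi[t] for w in data for t in ['<start>', *w]]
--     ys = [stoi[t] for w in data for t in [*w, '<end>']]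
--     return xs, ys
-- ===== Notes on version B (the rewrite author's own statement) =====
-- stated objective: simpler
-- what changed: Drops bigram pairing entirely: since the left column of all bigrams of a padded word is '<start>'+chars and the right column is chars+'<end>', B computes xs and ys as two independent flat comprehensions over data, with no adjacent-pair indexing, no prev state and no per-word range loop.
import Mathlib
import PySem

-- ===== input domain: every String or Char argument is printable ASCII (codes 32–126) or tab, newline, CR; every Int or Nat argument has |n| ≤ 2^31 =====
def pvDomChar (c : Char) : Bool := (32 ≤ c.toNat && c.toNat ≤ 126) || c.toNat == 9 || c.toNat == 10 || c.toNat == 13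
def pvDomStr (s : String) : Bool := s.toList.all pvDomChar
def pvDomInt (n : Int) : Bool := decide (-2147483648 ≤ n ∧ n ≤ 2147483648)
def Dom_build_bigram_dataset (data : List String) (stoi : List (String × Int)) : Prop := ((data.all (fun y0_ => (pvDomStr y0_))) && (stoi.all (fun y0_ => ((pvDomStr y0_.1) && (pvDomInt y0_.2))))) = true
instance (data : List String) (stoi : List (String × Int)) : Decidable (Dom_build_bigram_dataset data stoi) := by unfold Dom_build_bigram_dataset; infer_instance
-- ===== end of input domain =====

-- B replaces A's per-word adjacent-pair index loop by two independent flat comprehensions: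
-- xs = lookups of '<start>'+chars per word, ys = lookups of chars+'<end>' per word (objective: simpler).

-- ===== PORT A =====
-- stoi[k] : dict lookup (first-build semantics via Dict.ofList); KeyError excluded by Pre_
def build_bigram_dataset (data : List String) (stoi : List (String × Int)) : List Int × List Int :=
  data.foldl
    (fun (acc : List Int × List Int) i =>
      let w : List String := "<start>" :: i.toList.map (fun c => String.ofList [c]) ++ ["<end>"]
      (PySem.List.pyRange 0 ((w.length : Int) - 1) 1).foldl
        (fun (p : List Int × List Int) j =>
          (p.1 ++ [PySem.Dict.getD (PySem.Dict.ofList stoi) (PySem.List.pyGetD w j "") 0],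
           p.2 ++ [PySem.Dict.getD (PySem.Dict.ofList stoi) (PySem.List.pyGetD w (j + 1) "") 0]))
        acc)
    ([], [])

-- ===== PORT B =====
-- two flat comprehensions: comprehension over (w in data, t in toks w) ported as flatMap + map
def build_bigram_dataset_alt (data : List String) (stoi : List (String × Int)) : List Int × List Int :=
  (data.flatMap (fun w =>
     ("<start>" :: w.toList.map (fun c => String.ofList [c])).map
       (fun t => PySem.Dict.getD (PySem.Dict.ofList stoi) t 0)),
   data.flatMap (fun w =>
     (w.toList.map (fun c => String.ofList [c]) ++ ["<end>"]).map
       (fun t => PySem.Dict.getD (PySem.Dict.ofList stoi) t 0)))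

-- ===== PRECONDITION & SPEC =====
-- Pre_ excludes exactly the inputs where Python A raises KeyError: some performed lookup
-- ('<start>', '<end>' or a character of a word of data) is missing from stoi.
def Pre_build_bigram_dataset (data : List String) (stoi : List (String × Int)) : Prop :=
  (data.all (fun w =>
     (stoi.map Prod.fst).contains "<start>" &&
     (stoi.map Prod.fst).contains "<end>" &&
     w.toList.all (fun c => (stoi.map Prod.fst).contains (String.ofList [c])))) = true
instance (data : List String) (stoi : List (String × Int)) : Decidable (Pre_build_bigram_dataset data stoi) := by unfold Pre_build_bigram_dataset; infer_instance
def pvWitness_build_bigram_dataset : List String × (List (String × Int)) :=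
  (["ab", ""], [("<start>", 0), ("<end>", 1), ("a", 2), ("b", 3)])
def Spec_build_bigram_dataset (data : List String) (stoi : List (String × Int)) (out : List Int × List Int) : Prop := out = build_bigram_dataset_alt data stoi
instance (data : List String) (stoi : List (String × Int)) (out : List Int × List Int) : Decidable (Spec_build_bigram_dataset data stoi out) := by unfold Spec_build_bigram_dataset; infer_instance

-- ===== CLAIM (what is proved, stated in full; the proofs are below) =====
def Claim_equal_build_bigram_dataset : Prop := ∀ (data : List String) (stoi : List (String × Int)), Dom_build_bigram_dataset data stoi → Pre_build_bigram_dataset data stoi → Spec_build_bigram_dataset data stoi (build_bigram_dataset data stoi)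

-- ===== LEMMAS AND PROOFS =====

-- A's index loop over range(len w - 1) yields the dropLast/tail maps.
theorem a_inner (f : String → Int) (w : List String) (hw : w ≠ []) (acc : List Int × List Int) :
    (PySem.List.pyRange 0 ((w.length : Int) - 1) 1).foldl
      (fun (p : List Int × List Int) j =>
        (p.1 ++ [f (PySem.List.pyGetD w j "")], p.2 ++ [f (PySem.List.pyGetD w (j + 1) "")]))
      acc
    = (acc.1 ++ w.dropLast.map f, acc.2 ++ w.tail.map f) := by
  have hld : w.dropLast.length = w.length - 1 := List.length_dropLast
  have hw1 : 1 ≤ w.length := List.length_pos_of_ne_nil hw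
  rw [PySem.List.foldl_prod_mk
        (f := fun a j => a ++ [f (PySem.List.pyGetD w j "")])
        (g := fun a j => a ++ [f (PySem.List.pyGetD w (j + 1) "")])]
  rw [PySem.List.foldl_append_singleton_eq_map, PySem.List.foldl_append_singleton_eq_map]
  have hcast : ((w.length : Int) - 1) = (w.dropLast.length : Int) := by omega
  simp only [Prod.mk.injEq]
  refine ⟨?_, ?_⟩
  · -- xs component
    congr 1
    rw [hcast]
    calc (PySem.List.pyRange 0 ((w.dropLast.length : Int)) 1).map
            (fun j => f (PySem.List.pyGetD w j ""))
        = (PySem.List.pyRange 0 ((w.dropLast.length : Int)) 1).map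
            (fun j => f (PySem.List.pyGetD w.dropLast j "")) := by
          apply List.map_congr_left
          intro j hj
          rw [PySem.List.mem_pyRange_one] at hj
          rw [PySem.List.pyGetD_eq_getElem w "" hj.1 (by omega),
              PySem.List.pyGetD_eq_getElem w.dropLast "" hj.1 (by omega),
              List.getElem_dropLast]
      _ = ((PySem.List.pyRange 0 ((w.dropLast.length : Int)) 1).map
            (fun j => PySem.List.pyGetD w.dropLast j "")).map f := by rw [List.map_map]; rfl
      _ = w.dropLast.map f := by rw [PySem.List.map_pyGetD_pyRange_zero']
  · -- ys component
    congr 1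
    have hshift : (PySem.List.pyRange 0 ((w.length : Int) - 1) 1).map (fun j => j + 1)
        = PySem.List.pyRange 1 ((w.length : Int)) 1 := by
      rw [PySem.List.pyRange_one 0, PySem.List.pyRange_one 1, List.map_map]
      have hb : ((w.length : Int) - 1 - 0).toNat = ((w.length : Int) - 1).toNat := by omega
      rw [hb]
      apply List.map_congr_left
      intro k _
      simp only [Function.comp]
      omega
    calc (PySem.List.pyRange 0 ((w.length : Int) - 1) 1).map
            (fun j => f (PySem.List.pyGetD w (j + 1) ""))
        = ((PySem.List.pyRange 0 ((w.length : Int) - 1) 1).map (fun j => j + 1)).map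
            (fun j => f (PySem.List.pyGetD w j "")) := by rw [List.map_map]; rfl
      _ = (PySem.List.pyRange 1 ((w.length : Int)) 1).map
            (fun j => f (PySem.List.pyGetD w j "")) := by rw [hshift]
      _ = ((PySem.List.pyRange 1 ((w.length : Int)) 1).map
            (fun j => PySem.List.pyGetD w j "")).map f := by rw [List.map_map]; rfl
      _ = (w.drop 1).map f := by rw [PySem.List.map_pyGetD_pyRange' w "" (by omega)]; norm_num
      _ = w.tail.map f := by rw [List.drop_one]

-- ===== VERDICT (by name: the statement is the Claim_ definition above) =====
theorem build_bigram_dataset_spec : Claim_equal_build_bigram_dataset := by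
  intro data stoi _ _
  unfold Spec_build_bigram_dataset build_bigram_dataset build_bigram_dataset_alt
  set f : String → Int := fun s => PySem.Dict.getD (PySem.Dict.ofList stoi) s 0 with hf
  have hstep : ∀ (acc : List Int × List Int) (i : String), i ∈ data →
      (let w : List String := "<start>" :: i.toList.map (fun c => String.ofList [c]) ++ ["<end>"]
       (PySem.List.pyRange 0 ((w.length : Int) - 1) 1).foldl
        (fun (p : List Int × List Int) j => (p.1 ++ [f (PySem.List.pyGetD w j "")], p.2 ++ [f (PySem.List.pyGetD w (j + 1) "")]))
        acc)
      = (acc.1 ++ ("<start>" :: i.toList.map (fun c => String.ofList [c])).map f,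
         acc.2 ++ (i.toList.map (fun c => String.ofList [c]) ++ ["<end>"]).map f) := by
    intro acc i _
    rw [a_inner f ("<start>" :: i.toList.map (fun c => String.ofList [c]) ++ ["<end>"]) (by simp) acc]
    rw [List.dropLast_concat, List.cons_append, List.tail_cons]
  refine Eq.trans (PySem.List.foldl_congr_mem _ _ _ _ hstep) ?_
  refine Eq.trans (PySem.List.foldl_prod_mk
        (fun (a : List Int) (i : String) => a ++ ("<start>" :: i.toList.map (fun c => String.ofList [c])).map f)
        (fun (a : List Int) (i : String) => a ++ (i.toList.map (fun c => String.ofList [c]) ++ ["<end>"]).map f)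
        data [] []) ?_
  rw [PySem.List.foldl_append_eq_flatMap, PySem.List.foldl_append_eq_flatMap]
  simp
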